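-- pv_equiv track=rewrite | github.com/kevindwikiw/Invoice-Streamlit | modules/utils.py | normalize_desc_text
-- ===== SOURCE A (Python) =====
-- from typing import Any, List, Dict, Tuple
--
-- def normalize_desc_text(raw: Any) -> str:
--     s = str(raw or "")
--     s = s.replace("&lt;", "<").replace("&gt;", ">")
--     out = []
--     i = 0
--     n = len(s)
--     while i < n:
--         if s[i] == "<" and i + 2 < n and s[i:i+3].lower() == "<br":
--             j = i + 3
--             while j < n and s[j] != ">":
--                 j += 1
--             if j < n and s[j] == ">":
--                 out.append("\n")
--                 i = j + 1
--                 continue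
--         out.append(s[i])
--         i += 1
--
--     s = "".join(out)
--     s = s.replace("\r\n", "\n").replace("\r", "\n")
--     return s.strip()
-- ===== SOURCE B (Python) =====
-- import re
--
-- _BR_RE = re.compile(r'<br[^>]*>', re.IGNORECASE)
--
-- def normalize_desc_text(raw):
--     s = str(raw or "")
--     s = s.replace("&lt;", "<").replace("&gt;", ">")
--     s = _BR_RE.sub("\n", s)
--     s = s.replace("\r\n", "\n").replace("\r", "\n")
--     return s.strip()
-- ===== Notes on version B (the rewrite author's own statement) =====
-- stated objective: idiomatic
-- what changed: The hand-written index-tracking while-loop scanner for br tags (with inner first-gt search and continue) is replaced by one precompiled case-insensitive regex substitution mapping each tag to a newline; entity decoding, newline normalization and strip are unchanged.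
import Mathlib
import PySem

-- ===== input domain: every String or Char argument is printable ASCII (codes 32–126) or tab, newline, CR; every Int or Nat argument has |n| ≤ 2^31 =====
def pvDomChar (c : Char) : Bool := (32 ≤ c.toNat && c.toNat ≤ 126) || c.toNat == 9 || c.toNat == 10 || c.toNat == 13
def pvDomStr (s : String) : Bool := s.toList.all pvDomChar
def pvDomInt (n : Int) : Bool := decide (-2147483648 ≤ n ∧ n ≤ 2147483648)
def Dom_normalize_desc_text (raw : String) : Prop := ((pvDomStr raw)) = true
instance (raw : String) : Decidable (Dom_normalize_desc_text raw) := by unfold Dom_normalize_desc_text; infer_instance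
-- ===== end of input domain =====

-- B replaces A's hand-written index-chasing `<br…>` scanner with a single regex
-- substitution; objective: idiomatic (a timing run also measured B faster by a constant factor).

-- ===== PORT A =====
-- inner `while j < n and s[j] != ">"` loop of A
def pvA_findGt (s : List Char) (j : Nat) : Nat :=
  if h : j < s.length then
    if s[j] ≠ '>' then pvA_findGt s (j + 1) else j
  else j
termination_by s.length - j

-- outer `while i < n` loop of A, accumulating `out`; `fuel` only makes the loop
-- structurally total (i strictly increases each pass, so s.length passes suffice)
def pvA_loop (s : List Char) (fuel : Nat) (i : Nat) (out : List Char) : List Char :=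
  match fuel with
  | 0 => out
  | fuel + 1 =>
    if hi : i < s.length then
      if s[i] = '<' ∧ i + 2 < s.length ∧
          PySem.Chars.lower (PySem.List.slice s (some (i : Int)) (some ((i : Int) + 3))) = ['<', 'b', 'r'] then
        let j := pvA_findGt s (i + 3)
        if hj : j < s.length then
          if s[j] = '>' then pvA_loop s fuel (j + 1) (out ++ ['\n'])
          else pvA_loop s fuel (i + 1) (out ++ [s[i]])
        else pvA_loop s fuel (i + 1) (out ++ [s[i]])
      else pvA_loop s fuel (i + 1) (out ++ [s[i]])
    else out

def normalize_desc_text (raw : String) : String :=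
  let s := raw  -- str(raw or "") is the identity on a str argument
  let s := PySem.Str.replace (PySem.Str.replace s "&lt;" "<") "&gt;" ">"
  let s := String.ofList (pvA_loop s.toList s.toList.length 0 [])  -- "".join(out)
  let s := PySem.Str.replace (PySem.Str.replace s "\r\n" "\n") "\r" "\n"
  PySem.Str.strip s

-- ===== PORT B =====
-- re.sub(r'<br[^>]*>', '\n', ·, re.IGNORECASE): leftmost scan, each match is
-- '<' 'b' 'r' (case-insensitive) then all chars up to and including the first '>'
def pvB_sub (cs : List Char) : List Char :=
  match cs with
  | [] => []
  | c :: rest =>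
    if c = '<' ∧ (rest.take 2).map PySem.Chars.lowerChar = ['b', 'r'] then
      match h : (rest.drop 2).dropWhile (fun c => c ≠ '>') with
      | [] => c :: pvB_sub rest                 -- no closing '>': no match here
      | _ :: tail => '\n' :: pvB_sub tail       -- match consumed through first '>'
    else c :: pvB_sub rest
termination_by cs.length
decreasing_by
  · exact Nat.lt_succ_self _
  · have h1 : tail.length + 1 ≤ (rest.drop 2).length := by
      rw [← List.length_cons, ← h]; exact List.length_dropWhile_le _ _
    have h2 : (rest.drop 2).length ≤ rest.length := by
      rw [List.length_drop]; exact Nat.sub_le _ _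
    calc tail.length < rest.length := by omega
      _ < (c :: rest).length := Nat.lt_succ_self _
  · exact Nat.lt_succ_self _

def normalize_desc_text_alt (raw : String) : String :=
  let s := raw
  let s := PySem.Str.replace (PySem.Str.replace s "&lt;" "<") "&gt;" ">"
  let s := String.ofList (pvB_sub s.toList)
  let s := PySem.Str.replace (PySem.Str.replace s "\r\n" "\n") "\r" "\n"
  PySem.Str.strip s

-- ===== PRECONDITION & SPEC =====
def Spec_normalize_desc_text (raw : String) (out : String) : Prop := out = normalize_desc_text_alt raw
instance (raw : String) (out : String) : Decidable (Spec_normalize_desc_text raw out) := by unfold Spec_normalize_desc_text; infer_instance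

-- ===== CLAIM (what is proved, stated in full; the proofs are below) =====
def Claim_equal_normalize_desc_text : Prop := ∀ (raw : String), Dom_normalize_desc_text raw → Spec_normalize_desc_text raw (normalize_desc_text raw)

-- ===== LEMMAS AND PROOFS =====

theorem pvA_findGt_ge (s : List Char) (j : Nat) : j ≤ pvA_findGt s j := by
  fun_induction pvA_findGt s j with
  | case1 j h hne ih => omega
  | case2 j h hne => omega
  | case3 j h => omega

theorem pvA_findGt_drop (s : List Char) (j : Nat) :
    (s.drop j).dropWhile (fun c => c ≠ '>') = s.drop (pvA_findGt s j) := by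
  fun_induction pvA_findGt s j with
  | case1 j h hne ih =>
    rw [List.drop_eq_getElem_cons h, List.dropWhile_cons]
    simpa [hne] using ih
  | case2 j h hne =>
    simp only [ne_eq, not_not] at hne
    rw [List.drop_eq_getElem_cons h, List.dropWhile_cons]
    simp [hne]
  | case3 j h =>
    rw [List.drop_eq_nil_of_le (by omega)]
    rfl

theorem pvA_findGt_le (s : List Char) (j : Nat) (hj : j ≤ s.length) :
    pvA_findGt s j ≤ s.length := by
  fun_induction pvA_findGt s j with
  | case1 j h hne ih => exact ih (by omega)
  | case2 j h hne => omega
  | case3 j h => omega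

theorem pvA_findGt_get (s : List Char) (j : Nat) (h : pvA_findGt s j < s.length) :
    s[pvA_findGt s j] = '>' := by
  fun_induction pvA_findGt s j with
  | case1 j hj hne ih => exact ih h
  | case2 j hj hne => simpa using hne
  | case3 j hj => exact absurd h (by omega)

-- A's guard at index i equals B's match test on the tail starting at i
theorem pv_cond_iff (s : List Char) (i : Nat) (hi : i < s.length) :
    (s[i] = '<' ∧ i + 2 < s.length ∧
        PySem.Chars.lower (PySem.List.slice s (some (i : Int)) (some ((i : Int) + 3))) = ['<', 'b', 'r'])
    ↔ (s[i] = '<' ∧ ((s.drop (i + 1)).take 2).map PySem.Chars.lowerChar = ['b', 'r']) := by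
  have hs : PySem.List.slice s (some (i : Int)) (some ((i : Int) + 3)) = (s.drop i).take 3 := by
    have := PySem.List.slice_natCast_add s i 3
    push_cast at this ⊢
    exact this
  rw [hs, List.drop_eq_getElem_cons hi]
  constructor
  · rintro ⟨h1, h2, h3⟩
    refine ⟨h1, ?_⟩
    simp only [List.take_succ_cons, PySem.Chars.lower, List.map_cons] at h3
    exact (List.cons_eq_cons.mp h3).2
  · rintro ⟨h1, h2⟩
    have hlen : min 2 (s.length - (i + 1)) = 2 := by
      simpa using congrArg List.length h2
    refine ⟨h1, by omega, ?_⟩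
    simp only [List.take_succ_cons, PySem.Chars.lower, List.map_cons, h1, h2]
    rfl

theorem pv_loop_eq (s : List Char) (fuel : Nat) (i : Nat) (out : List Char)
    (hfuel : s.length ≤ fuel + i) :
    pvA_loop s fuel i out = out ++ pvB_sub (s.drop i) := by
  induction fuel generalizing i out with
  | zero =>
    rw [pvA_loop, List.drop_eq_nil_of_le (by omega), pvB_sub]
    simp
  | succ fuel ih =>
    rw [pvA_loop]
    by_cases hi : i < s.length
    · simp only [hi, dif_pos]
      by_cases hcond : s[i] = '<' ∧ i + 2 < s.length ∧
          PySem.Chars.lower (PySem.List.slice s (some (i : Int)) (some ((i : Int) + 3))) = ['<', 'b', 'r']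
      · simp only [hcond]
        have hc := (pv_cond_iff s i hi).mp hcond
        have hge : i + 3 ≤ pvA_findGt s (i + 3) := pvA_findGt_ge s (i + 3)
        have hdw : ((s.drop (i + 1)).drop 2).dropWhile (fun c => c ≠ '>')
            = s.drop (pvA_findGt s (i + 3)) := by
          rw [List.drop_drop]
          have := pvA_findGt_drop s (i + 3)
          simpa [Nat.add_comm] using this
        conv_rhs => rw [List.drop_eq_getElem_cons hi, pvB_sub]
        simp only [hc.1, hc.2, and_self, if_pos]
        by_cases hj : pvA_findGt s (i + 3) < s.length
        · simp only [hj, dif_pos, pvA_findGt_get s (i + 3) hj, if_pos]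
          rw [ih (pvA_findGt s (i + 3) + 1) (out ++ ['\n']) (by omega)]
          rw [hdw, List.drop_eq_getElem_cons hj]
          simp
        · simp only [hj, dif_neg, not_false_iff]
          have hle : pvA_findGt s (i + 3) ≤ s.length := pvA_findGt_le s (i + 3) (by omega)
          have hj' : pvA_findGt s (i + 3) = s.length := by omega
          have hnil : ((s.drop (i + 1)).drop 2).dropWhile (fun c => c ≠ '>') = ([] : List Char) := by
            rw [hdw, hj', List.drop_length]
          rw [ih (i + 1) (out ++ ['<']) (by omega), hnil]
          simp
      · simp only [hcond, if_neg, not_false_iff]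
        have hc : ¬ (s[i] = '<' ∧ ((s.drop (i + 1)).take 2).map PySem.Chars.lowerChar = ['b', 'r']) :=
          fun h => hcond ((pv_cond_iff s i hi).mpr h)
        rw [ih (i + 1) (out ++ [s[i]]) (by omega)]
        conv_rhs => rw [List.drop_eq_getElem_cons hi, pvB_sub]
        simp only [hc, if_neg, not_false_iff]
        simp
    · simp only [hi, dif_neg, not_false_iff]
      rw [List.drop_eq_nil_of_le (by omega), pvB_sub]
      simp

-- ===== VERDICT (by name: the statement is the Claim_ definition above) =====
theorem normalize_desc_text_spec : Claim_equal_normalize_desc_text := by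
  intro raw _
  have h := fun (t : List Char) => pv_loop_eq t t.length 0 [] (by omega)
  simp only [Spec_normalize_desc_text, normalize_desc_text, normalize_desc_text_alt, h,
    List.nil_append, List.drop_zero]
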